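-- pv_equiv track=rewrite | github.com/sebvz777/Bachelorthesis | Web13_BCS09.py | sc
-- ===== SOURCE A (Python) =====
-- import math
--
-- def sc(n):
--     outlist = []
--     for i in range(n + 1):
--         if i % 2 != 0:
--             out = 0
--         else:
--
--             out = math.comb(i, i // 2) // (1+i//2)
--
--         outlist.append(out)
--
--     return outlist
-- ===== SOURCE B (Python) =====
-- def sc(n):
--     # One pass carrying the running Catalan number instead of recomputing a binomial per index.
--     res = []
--     c = 1
--     for k in range((n + 2) // 2):
--         res.append(c)
--         if 2 * k + 1 <= n:
--             res.append(0)
--         c = c * 2 * (2 * k + 1) // (k + 2)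
--     return res
-- ===== Notes on version B (the rewrite author's own statement) =====
-- stated objective: faster
-- what changed: B replaces the fresh binomial-coefficient computation at every even index by a single pass that carries the running Catalan number, updating it with one multiplication and one exact division per step and emitting the interleaved zeros as it goes.
import Mathlib
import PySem

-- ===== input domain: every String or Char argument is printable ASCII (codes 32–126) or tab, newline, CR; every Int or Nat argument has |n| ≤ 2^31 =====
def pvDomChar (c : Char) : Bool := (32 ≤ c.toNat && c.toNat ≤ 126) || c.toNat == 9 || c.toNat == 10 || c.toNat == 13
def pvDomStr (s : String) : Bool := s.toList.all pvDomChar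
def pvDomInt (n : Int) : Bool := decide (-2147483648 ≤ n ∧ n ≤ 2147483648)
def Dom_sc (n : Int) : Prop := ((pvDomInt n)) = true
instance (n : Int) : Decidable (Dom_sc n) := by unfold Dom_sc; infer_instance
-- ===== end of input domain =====

-- B computes each even-index entry from the previous one by the incremental Catalan
-- recurrence in a single pass, instead of A's fresh binomial coefficient per index.

-- ===== PORT A =====
-- math.comb(i, i // 2) is ported as Nat.choose on i.toNat (exact: the loop only visits i ≥ 0).
def sc (n : Int) : List Int :=
  (PySem.List.pyRange 0 (n + 1) 1).foldl
    (fun outlist i =>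
      outlist ++
        [if PySem.Int.mod i 2 ≠ 0 then (0 : Int)
         else PySem.Int.floordiv
                ((Nat.choose i.toNat (PySem.Int.floordiv i 2).toNat : Nat) : Int)
                (1 + PySem.Int.floordiv i 2)])
    []

-- ===== PORT B =====
def sc_alt (n : Int) : List Int :=
  ((PySem.List.pyRange 0 (PySem.Int.floordiv (n + 2) 2) 1).foldl
    (fun st k =>
      (st.1 ++ [st.2] ++ (if 2 * k + 1 ≤ n then [(0 : Int)] else []),
       PySem.Int.floordiv (st.2 * 2 * (2 * k + 1)) (k + 2)))
    (([] : List Int), (1 : Int))).1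

-- ===== PRECONDITION & SPEC =====
def Spec_sc (n : Int) (out : List Int) : Prop := out = sc_alt n
instance (n : Int) (out : List Int) : Decidable (Spec_sc n out) := by unfold Spec_sc; infer_instance

-- ===== CLAIM (what is proved, stated in full; the proofs are below) =====
def Claim_equal_sc : Prop := ∀ (n : Int), Dom_sc n → Spec_sc n (sc n)

-- ===== LEMMAS AND PROOFS =====

-- the common value: 0 at odd indices, the Catalan number at even indices
def pvG (i : Nat) : Int := if i % 2 = 1 then 0 else (catalan (i / 2) : Int)

theorem pv_foldl_app (l : List Int) (f : Int → Int) (acc : List Int) :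
    l.foldl (fun a i => a ++ [f i]) acc = acc ++ l.map f := by
  induction l generalizing acc with
  | nil => simp
  | cons x xs ih => simp [ih]

-- A's element at index k equals pvG k
theorem pv_A_elem (k : Nat) :
    (if PySem.Int.mod (k : Int) 2 ≠ 0 then (0 : Int)
     else PySem.Int.floordiv
            ((Nat.choose (k : Int).toNat (PySem.Int.floordiv (k : Int) 2).toNat : Nat) : Int)
            (1 + PySem.Int.floordiv (k : Int) 2)) = pvG k := by
  have hmod : PySem.Int.mod (k : Int) 2 = ((k % 2 : Nat) : Int) := by
    exact_mod_cast PySem.Int.mod_natCast k 2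
  have hdiv : PySem.Int.floordiv (k : Int) 2 = ((k / 2 : Nat) : Int) := by
    exact_mod_cast PySem.Int.floordiv_natCast k 2
  rw [hmod, hdiv, pvG]
  by_cases h : k % 2 = 1
  · simp [h]
  · have hk0 : k % 2 = 0 := by omega
    simp only [hk0]
    have h1 : ((k : Int).toNat) = k := by simp
    have h2 : (1 : Int) + ((k / 2 : Nat) : Int) = ((1 + k / 2 : Nat) : Int) := by push_cast; ring
    rw [h1, h2, Int.toNat_natCast, PySem.Int.floordiv_natCast]
    have hk : k = 2 * (k / 2) := by omega
    have hcb : Nat.choose k (k / 2) = Nat.centralBinom (k / 2) := by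
      rw [Nat.centralBinom]; rw [hk]; simp
    rw [hcb, ← succ_mul_catalan_eq_centralBinom]
    have : (1 + k / 2) = (k / 2 + 1) := by omega
    rw [this, Nat.mul_div_cancel_left _ (by omega : 0 < k / 2 + 1)]
    simp

theorem pv_sc_eq_map (N : Nat) : sc (N : Int) = (List.range (N + 1)).map pvG := by
  unfold sc
  rw [pv_foldl_app]
  rw [show ((N : Int) + 1) = ((N + 1 : Nat) : Int) by push_cast; ring,
    PySem.List.pyRange_zero_nat]
  rw [List.map_map]
  simp only [List.nil_append]
  apply List.map_congr_left
  intro k _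
  exact pv_A_elem k

-- Catalan step: catalan j * 2 * (2j+1) // (j+2) = catalan (j+1), exactly
theorem pv_catalan_step (j : Nat) :
    catalan j * 2 * (2 * j + 1) / (j + 2) = catalan (j + 1) := by
  have key : (j + 2) * catalan (j + 1) = catalan j * 2 * (2 * j + 1) := by
    have h1 := succ_mul_catalan_eq_centralBinom (j + 1)
    have h2 := Nat.succ_mul_centralBinom_succ j
    have h3 := succ_mul_catalan_eq_centralBinom j
    have : (j + 1) * ((j + 2) * catalan (j + 1)) =
        (j + 1) * (catalan j * 2 * (2 * j + 1)) := by
      calc (j + 1) * ((j + 2) * catalan (j + 1))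
          = (j + 1) * ((j + 1 + 1) * catalan (j + 1)) := by ring
        _ = (j + 1) * Nat.centralBinom (j + 1) := by rw [h1]
        _ = 2 * (2 * j + 1) * Nat.centralBinom j := h2
        _ = 2 * (2 * j + 1) * ((j + 1) * catalan j) := by rw [h3]
        _ = (j + 1) * (catalan j * 2 * (2 * j + 1)) := by ring
    exact Nat.eq_of_mul_eq_mul_left (by omega) this
  rw [← key, Nat.mul_div_cancel_left _ (by omega : 0 < j + 2)]

-- invariant of B's fold: after j steps the list is the prefix of the target and the
-- accumulator is catalan j
theorem pv_B_inv (N j : Nat) (hj : j ≤ (N + 2) / 2) :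
    (PySem.List.pyRange 0 (j : Int) 1).foldl
      (fun st k =>
        (st.1 ++ [st.2] ++ (if 2 * k + 1 ≤ (N : Int) then [(0 : Int)] else []),
         PySem.Int.floordiv (st.2 * 2 * (2 * k + 1)) (k + 2)))
      (([] : List Int), (1 : Int))
    = ((List.range (min (2 * j) (N + 1))).map pvG, (catalan j : Int)) := by
  induction j with
  | zero => simp [PySem.List.pyRange_one_eq_nil, catalan_zero]
  | succ j ih =>
    have hj' : j ≤ (N + 2) / 2 := by omega
    have h2j : 2 * j ≤ N := by omega
    rw [show ((j + 1 : Nat) : Int) = (j : Int) + 1 by push_cast; ring,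
      PySem.List.pyRange_one_succ_right (by positivity), List.foldl_append, ih hj']
    simp only [List.foldl_cons, List.foldl_nil, Prod.mk.injEq]
    constructor
    · -- list component
      have hmin : min (2 * j) (N + 1) = 2 * j := by omega
      rw [hmin]
      by_cases hle : 2 * (j : Int) + 1 ≤ (N : Int)
      · have hN : 2 * j + 1 ≤ N := by exact_mod_cast hle
        have hmin2 : min (2 * (j + 1)) (N + 1) = 2 * j + 2 := by omega
        rw [if_pos hle, hmin2,
          show 2 * j + 2 = (2 * j + 1) + 1 by ring, List.range_succ, List.range_succ]
        simp [pvG, Nat.mul_mod_right,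
          show (2 * j + 1) % 2 = 1 by omega, show (2 * j) / 2 = j by omega]
      · have hN : ¬ (2 * j + 1 ≤ N) := by
          intro h; exact hle (by exact_mod_cast h)
        have hmin2 : min (2 * (j + 1)) (N + 1) = 2 * j + 1 := by omega
        rw [if_neg hle, hmin2, List.range_succ]
        simp [pvG, show (2 * j) % 2 = 0 by omega, show (2 * j) / 2 = j by omega]
    · -- accumulator component
      have : (catalan j : Int) * 2 * (2 * (j : Int) + 1) =
          ((catalan j * 2 * (2 * j + 1) : Nat) : Int) := by push_cast; ring
      rw [this, show ((j : Int) + 2) = ((j + 2 : Nat) : Int) by push_cast; ring,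
        PySem.Int.floordiv_natCast, pv_catalan_step]

theorem pv_sc_alt_eq_map (N : Nat) : sc_alt (N : Int) = (List.range (N + 1)).map pvG := by
  unfold sc_alt
  have hM : PySem.Int.floordiv ((N : Int) + 2) 2 = (((N + 2) / 2 : Nat) : Int) := by
    rw [show ((N : Int) + 2) = ((N + 2 : Nat) : Int) by push_cast; ring]
    exact_mod_cast PySem.Int.floordiv_natCast (N + 2) 2
  rw [hM, pv_B_inv N ((N + 2) / 2) (le_refl _)]
  have : min (2 * ((N + 2) / 2)) (N + 1) = N + 1 := by omega
  rw [this]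

theorem pv_neg_both (n : Int) (hn : n < 0) : sc n = sc_alt n := by
  unfold sc sc_alt
  have h1 : PySem.List.pyRange 0 (n + 1) 1 = [] :=
    PySem.List.pyRange_one_eq_nil (by omega)
  have hfd : PySem.Int.floordiv (n + 2) 2 < 1 := by
    rw [PySem.Int.floordiv_lt_iff_lt_mul]
    · omega
    · omega
  have h2 : PySem.List.pyRange 0 (PySem.Int.floordiv (n + 2) 2) 1 = [] :=
    PySem.List.pyRange_one_eq_nil (by omega)
  rw [h1, h2]
  simp

-- ===== VERDICT (by name: the statement is the Claim_ definition above) =====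
theorem sc_spec : Claim_equal_sc := by
  intro n _
  unfold Spec_sc
  by_cases hn : 0 ≤ n
  · obtain ⟨N, rfl⟩ := Int.eq_ofNat_of_zero_le hn
    rw [pv_sc_eq_map, pv_sc_alt_eq_map]
  · exact pv_neg_both n (by omega)
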